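-- pv_equiv track=rewrite | github.com/Zi-Shane/leetcode-python | interviews/ubitus/ipv6.py | convert_zero
-- ===== SOURCE A (Python) =====
-- def convert_zero(input):
--     output = ""
--     flag = 0
--     for c in input:
--         if c == ':':
--             output += c
--             flag = 0
--         elif c != '0':
--             output += c
--             flag = 1
--         elif c == '0' and flag == 1:
--             output += c
--
--     return output
-- ===== SOURCE B (Python) =====
-- def convert_zero(input):
--     return ':'.join(g.lstrip('0') for g in input.split(':'))
-- ===== Notes on version B (the rewrite author's own statement) =====
-- stated objective: idiomatic
-- what changed: Replaces the character-by-character state machine with a flag by a tokenize-transform-join decomposition: split the input on the colon separator, strip the leading zeros of each group with lstrip, and rejoin the groups.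
import Mathlib
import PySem

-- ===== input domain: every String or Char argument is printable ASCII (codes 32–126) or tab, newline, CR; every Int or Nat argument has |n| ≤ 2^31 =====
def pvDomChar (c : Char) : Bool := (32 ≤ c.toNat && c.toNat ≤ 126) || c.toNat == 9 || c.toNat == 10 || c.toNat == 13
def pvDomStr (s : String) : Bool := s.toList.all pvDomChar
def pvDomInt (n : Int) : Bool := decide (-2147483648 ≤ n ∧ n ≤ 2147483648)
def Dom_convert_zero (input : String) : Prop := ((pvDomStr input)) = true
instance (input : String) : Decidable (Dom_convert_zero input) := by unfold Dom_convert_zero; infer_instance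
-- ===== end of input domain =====

-- B replaces A's character-scan state machine by split-on-':' / lstrip('0') / join (objective: idiomatic).

-- ===== PORT A =====
-- one loop iteration of A: state = (output so far, flag)
def convert_zero_step (st : List Char × Int) (c : Char) : List Char × Int :=
  if c = ':' then (st.1 ++ [c], 0)
  else if c ≠ '0' then (st.1 ++ [c], 1)
  else if c = '0' ∧ st.2 = 1 then (st.1 ++ [c], st.2)
  else st

def convert_zero (input : String) : String :=
  String.mk (input.toList.foldl convert_zero_step ([], 0)).1

-- ===== PORT B =====
-- input.split(':') → List.splitOn ':' (exact for a nonempty separator: keeps empty groups),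
-- g.lstrip('0') → List.dropWhile (· == '0') (exact: drops exactly the leading '0's),
-- ':'.join → List.intercalate [':']
def convert_zero_alt (input : String) : String :=
  String.mk (List.intercalate [':']
    ((input.toList.splitOn ':').map (List.dropWhile (· == '0'))))

-- ===== PRECONDITION & SPEC =====
def Spec_convert_zero (input : String) (out : String) : Prop := out = convert_zero_alt input
instance (input : String) (out : String) : Decidable (Spec_convert_zero input out) := by unfold Spec_convert_zero; infer_instance

-- ===== CLAIM (what is proved, stated in full; the proofs are below) =====
def Claim_equal_convert_zero : Prop := ∀ (input : String), Dom_convert_zero input → Spec_convert_zero input (convert_zero input)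

-- ===== LEMMAS AND PROOFS =====

-- A's loop, split by the value of `flag`: czF = output produced from flag 0, czH from flag 1
mutual
def czF : List Char → List Char
  | [] => []
  | c :: cs => if c = ':' then ':' :: czF cs
               else if c = '0' then czF cs
               else c :: czH cs
def czH : List Char → List Char
  | [] => []
  | c :: cs => if c = ':' then ':' :: czF cs else c :: czH cs
end

lemma cz_fold (cs : List Char) : ∀ out : List Char,
    (cs.foldl convert_zero_step (out, 0)).1 = out ++ czF cs ∧
    (cs.foldl convert_zero_step (out, 1)).1 = out ++ czH cs := by
  induction cs with
  | nil => simp [czF, czH]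
  | cons c cs ih =>
    intro out
    by_cases hc : c = ':'
    · subst hc
      have hF := (ih (out ++ [':'])).1
      constructor <;>
        simp [List.foldl_cons, convert_zero_step, czF, czH, hF]
    · by_cases h0 : c = '0'
      · subst h0
        have hF := (ih out).1
        have hH := (ih (out ++ ['0'])).2
        constructor <;>
          simp [List.foldl_cons, convert_zero_step, hc, czF, czH, hF, hH]
      · have hH := (ih (out ++ [c])).2
        constructor <;>
          simp [List.foldl_cons, convert_zero_step, hc, h0, czF, czH, hH]

lemma intercalate_cons_head (c : Char) (x : List Char) (l : List (List Char)) :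
    List.intercalate [':'] ((c :: x) :: l) = c :: List.intercalate [':'] (x :: l) := by
  cases l <;> simp [List.intercalate]

lemma cz_spec (cs : List Char) :
    czF cs = List.intercalate [':']
      ((List.splitOnP (· == ':') cs).map (List.dropWhile (· == '0'))) ∧
    czH cs = List.intercalate [':']
      ((List.splitOnP (· == ':') cs).headI ::
        ((List.splitOnP (· == ':') cs).tail.map (List.dropWhile (· == '0')))) := by
  induction cs with
  | nil => simp [czF, czH, List.splitOnP, List.splitOnP.go, List.intercalate]
  | cons c cs ih =>
    obtain ⟨ihF, ihH⟩ := ih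
    obtain ⟨g, gs, hS⟩ :=
      List.exists_cons_of_ne_nil (List.splitOnP_ne_nil (· == ':') cs)
    rw [List.splitOnP_cons, hS]
    by_cases hc : c = ':'
    · subst hc
      rw [hS] at ihF
      constructor
      · simp [czF, ihF, List.intercalate]
      · simp [czH, ihF, List.intercalate]
    · have hcb : (c == ':') = false := by simpa using hc
      rw [hS] at ihF ihH
      simp only [List.headI, List.tail] at ihH
      rw [hcb]
      simp only [Bool.false_eq_true, if_false, List.modifyHead, List.map_cons,
        List.headI, List.tail]
      by_cases h0 : c = '0'
      · subst h0
        constructor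
        · rw [List.dropWhile_cons_of_pos (by decide)]
          simp [czF, hc, ihF]
        · rw [intercalate_cons_head]
          simp [czH, hc, ihH]
      · have h0b : ((c : Char) == '0') = false := by simpa using h0
        constructor
        · rw [List.dropWhile_cons_of_neg (by simp [h0b]), intercalate_cons_head]
          simp [czF, hc, h0, ihH]
        · rw [intercalate_cons_head]
          simp [czH, hc, ihH]

-- ===== VERDICT (by name: the statement is the Claim_ definition above) =====
theorem convert_zero_spec : Claim_equal_convert_zero := by
  intro input _
  unfold Spec_convert_zero convert_zero convert_zero_alt
  have h1 := (cz_fold input.toList []).1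
  rw [List.nil_append] at h1
  rw [h1, (cz_spec input.toList).1, List.splitOn]
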